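-- pv_equiv track=rewrite | github.com/veenatrivedi15/BE-DS-Project-2025-26 | Group_09/Source_Code/backends/main/measure_creation.py | _find_primary_target
-- ===== SOURCE A (Python) =====
-- from typing import Dict, List, Optional, Tuple
--
-- def _find_primary_target(numeric_cols: List[str]) -> str:
--     """Choose the best column to use as the regression target."""
--     priority = ["total_price", "total", "revenue", "sales", "amount",
--                 "profit", "income", "earnings"]
--     for kw in priority:
--         for c in numeric_cols:
--             if kw in c.lower().replace("_", " "):
--                 return c
--     return numeric_cols[0] if numeric_cols else ""
-- ===== SOURCE B (Python) =====
-- def _find_primary_target(numeric_cols):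
--     """Choose the best column to use as the regression target."""
--     priority = ["total_price", "total", "revenue", "sales", "amount",
--                 "profit", "income", "earnings"]
--
--     def rank(c):
--         t = c.lower().replace("_", " ")
--         for i, kw in enumerate(priority):
--             if kw in t:
--                 return i
--         return len(priority)
--
--     best = None
--     best_rank = len(priority)
--     for c in numeric_cols:
--         r = rank(c)
--         if r < best_rank:
--             best, best_rank = c, r
--     if best is not None:
--         return best
--     return numeric_cols[0] if numeric_cols else ""
-- ===== Notes on version B (the rewrite author's own statement) =====
-- stated objective: alternative
-- what changed: Replaces the keyword-outer double scan (restarting over all columns for each priority keyword) by a single pass over the columns that computes each column's priority rank once and keeps a strict-less argmin, so ties keep the earliest column.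
import Mathlib
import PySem

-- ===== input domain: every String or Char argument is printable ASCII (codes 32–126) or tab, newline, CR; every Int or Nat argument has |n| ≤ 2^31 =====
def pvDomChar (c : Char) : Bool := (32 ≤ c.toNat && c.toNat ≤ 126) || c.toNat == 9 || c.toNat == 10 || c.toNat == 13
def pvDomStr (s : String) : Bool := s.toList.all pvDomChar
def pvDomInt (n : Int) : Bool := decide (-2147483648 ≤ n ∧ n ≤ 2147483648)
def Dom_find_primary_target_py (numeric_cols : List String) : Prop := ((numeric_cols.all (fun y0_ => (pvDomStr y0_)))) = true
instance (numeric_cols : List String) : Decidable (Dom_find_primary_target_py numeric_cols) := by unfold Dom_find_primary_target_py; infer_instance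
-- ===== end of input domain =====

-- One line: B replaces A's keyword-outer double scan by a single strict-less argmin pass over
-- columns using a per-column priority rank (objective: alternative decomposition, same cost).

-- ===== PORT A =====
def pvPriority : List String :=
  ["total_price", "total", "revenue", "sales", "amount", "profit", "income", "earnings"]

-- c.lower().replace("_", " ")
def pvNorm (c : String) : String := PySem.Str.replace (PySem.Str.lower c) "_" " "

-- inner 'for c in numeric_cols: if kw in …: return c'
def pvAInner (kw : String) : List String → Option String
  | [] => none
  | c :: cs => if PySem.Str.isIn kw (pvNorm c) then some c else pvAInner kw cs

-- outer 'for kw in priority'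
def pvAOuter : List String → List String → Option String
  | [], _ => none
  | kw :: kws, cols =>
      match pvAInner kw cols with
      | some c => some c
      | none => pvAOuter kws cols

def find_primary_target_py (numeric_cols : List String) : String :=
  match pvAOuter pvPriority numeric_cols with
  | some c => c
  | none =>
      match numeric_cols with
      | [] => ""
      | c :: _ => c

-- ===== PORT B =====
-- rank(c): index of the first priority keyword contained in the normalised column,
-- len(priority) if none (structural recursion over the keyword list).
def pvRank (t : String) : List String → Nat
  | [] => 0
  | kw :: kws => if PySem.Str.isIn kw t then 0 else 1 + pvRank t kws

-- the argmin loop: state (best, best_rank), update only on strictly smaller rank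
def pvBGo (kws : List String) : List String → Option String → Nat → Option String
  | [], best, _ => best
  | c :: cs, best, bestRank =>
      let r := pvRank (pvNorm c) kws
      if r < bestRank then pvBGo kws cs (some c) r else pvBGo kws cs best bestRank

def find_primary_target_py_alt (numeric_cols : List String) : String :=
  match pvBGo pvPriority numeric_cols none pvPriority.length with
  | some b => b
  | none =>
      match numeric_cols with
      | [] => ""
      | c :: _ => c

-- ===== PRECONDITION & SPEC =====
def Spec_find_primary_target_py (numeric_cols : List String) (out : String) : Prop := out = find_primary_target_py_alt numeric_cols
instance (numeric_cols : List String) (out : String) : Decidable (Spec_find_primary_target_py numeric_cols out) := by unfold Spec_find_primary_target_py; infer_instance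

-- ===== CLAIM (what is proved, stated in full; the proofs are below) =====
def Claim_equal_find_primary_target_py : Prop := ∀ (numeric_cols : List String), Dom_find_primary_target_py numeric_cols → Spec_find_primary_target_py numeric_cols (find_primary_target_py numeric_cols)

-- ===== LEMMAS AND PROOFS =====

-- once best_rank is 0 nothing updates: the fold is frozen
theorem pvBGo_frozen (kws : List String) (cols : List String) (best : Option String) :
    pvBGo kws cols best 0 = best := by
  induction cols with
  | nil => rfl
  | cons c cs ih => simp only [pvBGo, Nat.not_lt_zero, if_false, ih]

-- if a keyword matches no column, dropping it shifts every rank and the bound by one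
theorem pvBGo_shift (kw : String) (kws : List String) (cols : List String)
    (h : ∀ c ∈ cols, PySem.Str.isIn kw (pvNorm c) = false) :
    ∀ (best : Option String) (b : Nat),
      pvBGo (kw :: kws) cols best (1 + b) = pvBGo kws cols best b := by
  induction cols with
  | nil => intro best b; rfl
  | cons c cs ih =>
      intro best b
      have hc : PySem.Str.isIn kw (pvNorm c) = false := h c (by simp)
      have hcs : ∀ c' ∈ cs, PySem.Str.isIn kw (pvNorm c') = false := by
        intro c' hm; exact h c' (by simp [hm])
      simp only [pvBGo, pvRank, hc, Bool.false_eq_true, if_false]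
      by_cases hlt : pvRank (pvNorm c) kws < b
      · rw [if_pos hlt, if_pos (by omega : 1 + pvRank (pvNorm c) kws < 1 + b)]
        exact ih hcs (some c) (pvRank (pvNorm c) kws)
      · rw [if_neg hlt, if_neg (by omega : ¬ (1 + pvRank (pvNorm c) kws < 1 + b))]
        exact ih hcs best b

-- if the head keyword has a first matching column c0, the fold returns c0
theorem pvBGo_zero (kw : String) (kws : List String) :
    ∀ (cols : List String) (c0 : String), pvAInner kw cols = some c0 →
      ∀ (best : Option String) (b : Nat), 1 ≤ b →
        pvBGo (kw :: kws) cols best b = some c0 := by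
  intro cols
  induction cols with
  | nil => intro c0 h; cases h
  | cons c cs ih =>
      intro c0 h best b hb
      cases hc : PySem.Str.isIn kw (pvNorm c) with
      | true =>
          simp only [pvAInner, hc, if_true] at h
          have hcc : c = c0 := Option.some_injective _ h
          subst hcc
          simp only [pvBGo, pvRank, hc, if_true]
          rw [if_pos (by omega : (0 : Nat) < b)]
          exact pvBGo_frozen _ _ _
      | false =>
          simp only [pvAInner, hc, Bool.false_eq_true, if_false] at h
          simp only [pvBGo, pvRank, hc, Bool.false_eq_true, if_false]
          by_cases hlt : 1 + pvRank (pvNorm c) kws < b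
          · rw [if_pos hlt]
            exact ih c0 h (some c) _ (by omega)
          · rw [if_neg hlt]
            exact ih c0 h best b hb

-- pvAInner = none means no column matches the keyword
theorem pvAInner_none (kw : String) :
    ∀ (cols : List String), pvAInner kw cols = none →
      ∀ c ∈ cols, PySem.Str.isIn kw (pvNorm c) = false := by
  intro cols
  induction cols with
  | nil => intro _ c hc; cases hc
  | cons c cs ih =>
      intro h c' hc'
      cases hc : PySem.Str.isIn kw (pvNorm c) with
      | true => simp only [pvAInner, hc, if_true] at h; cases h
      | false =>
          simp only [pvAInner, hc, Bool.false_eq_true, if_false] at h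
          rcases List.mem_cons.mp hc' with rfl | hm
          · exact hc
          · exact ih h c' hm

-- the argmin fold equals A's keyword-outer search
theorem pvMain : ∀ (kws cols : List String),
    pvBGo kws cols none kws.length = pvAOuter kws cols := by
  intro kws
  induction kws with
  | nil => intro cols; exact pvBGo_frozen [] cols none
  | cons kw kws ih =>
      intro cols
      have hlen : (kw :: kws).length = 1 + kws.length := by
        simp only [List.length_cons]; omega
      cases h : pvAInner kw cols with
      | some c0 =>
          simp only [pvAOuter, h]
          rw [hlen]
          exact pvBGo_zero kw kws cols c0 h none _ (by omega)
      | none =>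
          simp only [pvAOuter, h]
          rw [hlen, pvBGo_shift kw kws cols (pvAInner_none kw cols h)]
          exact ih cols

-- ===== VERDICT (by name: the statement is the Claim_ definition above) =====
theorem find_primary_target_py_spec : Claim_equal_find_primary_target_py := by
  intro numeric_cols _
  unfold Spec_find_primary_target_py find_primary_target_py find_primary_target_py_alt
  rw [pvMain]
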